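-- pv_equiv track=rewrite | github.com/imyongge5/jpn_word_trainer | scripts/enrich_jmdict.py | choose_primary_part_of_speech
-- ===== SOURCE A (Python) =====
-- POS_TO_PART_OF_SPEECH = {
--     "noun (common) (futsuumeishi)": "명사",
--     "noun, used as a suffix": "접미 명사",
--     "noun, used as a prefix": "접두 명사",
--     "noun or participle which takes the aux. verb suru": "する명사",
--     "suru verb": "する동사",
--     "suru verb - included": "する동사",
--     "Godan verb with 'u' ending": "동사",
--     "Godan verb with 'ku' ending": "동사",
--     "Godan verb with 'gu' ending": "동사",
--     "Godan verb with 'su' ending": "동사",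
--     "Godan verb with 'tsu' ending": "동사",
--     "Godan verb with 'nu' ending": "동사",
--     "Godan verb with 'bu' ending": "동사",
--     "Godan verb with 'mu' ending": "동사",
--     "Godan verb with 'ru' ending": "동사",
--     "Ichidan verb": "동사",
--     "Kuru verb - special class": "동사",
--     "intransitive verb": "자동사",
--     "transitive verb": "타동사",
--     "adjectival nouns or quasi-adjectives (keiyodoshi)": "형용동사",
--     "adjective (keiyoushi)": "형용사",
--     "adverb (fukushi)": "부사",
--     "adverb taking the 'to' particle": "부사",
--     "adverbial noun": "부사",
--     "expressions (phrases, clauses, etc.)": "표현",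
--     "interjection (kandoushi)": "감탄사",
--     "conjunction": "접속사",
--     "pronoun": "대명사",
--     "counter": "조수사",
--     "auxiliary verb": "조동사",
--     "prefix": "접두사",
--     "suffix": "접미사",
-- }
--
-- def choose_primary_part_of_speech(tags: list[str]) -> str:
--     for tag in tags:
--         if tag in POS_TO_PART_OF_SPEECH:
--             mapped = POS_TO_PART_OF_SPEECH[tag]
--             if mapped not in {"자동사", "타동사"}:
--                 return mapped
--     for tag in tags:
--         mapped = POS_TO_PART_OF_SPEECH.get(tag)
--         if mapped:
--             return mapped
--     return ""
-- ===== SOURCE B (Python) =====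
-- POS_TO_PART_OF_SPEECH = {
--     "noun (common) (futsuumeishi)": "명사",
--     "noun, used as a suffix": "접미 명사",
--     "noun, used as a prefix": "접두 명사",
--     "noun or participle which takes the aux. verb suru": "する명사",
--     "suru verb": "する동사",
--     "suru verb - included": "する동사",
--     "Godan verb with 'u' ending": "동사",
--     "Godan verb with 'ku' ending": "동사",
--     "Godan verb with 'gu' ending": "동사",
--     "Godan verb with 'su' ending": "동사",
--     "Godan verb with 'tsu' ending": "동사",
--     "Godan verb with 'nu' ending": "동사",
--     "Godan verb with 'bu' ending": "동사",
--     "Godan verb with 'mu' ending": "동사",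
--     "Godan verb with 'ru' ending": "동사",
--     "Ichidan verb": "동사",
--     "Kuru verb - special class": "동사",
--     "intransitive verb": "자동사",
--     "transitive verb": "타동사",
--     "adjectival nouns or quasi-adjectives (keiyodoshi)": "형용동사",
--     "adjective (keiyoushi)": "형용사",
--     "adverb (fukushi)": "부사",
--     "adverb taking the 'to' particle": "부사",
--     "adverbial noun": "부사",
--     "expressions (phrases, clauses, etc.)": "표현",
--     "interjection (kandoushi)": "감탄사",
--     "conjunction": "접속사",
--     "pronoun": "대명사",
--     "counter": "조수사",
--     "auxiliary verb": "조동사",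
--     "prefix": "접두사",
--     "suffix": "접미사",
-- }
--
-- _VERBS = ("자동사", "타동사")
--
--
-- def choose_primary_part_of_speech(tags: list[str]) -> str:
--     # Rank every mapped tag by (is-plain-verb-label, position) and pick the minimum:
--     # preferred labels (rank False) beat verb labels (rank True), earlier beats later.
--     candidates = [
--         (POS_TO_PART_OF_SPEECH[tag] in _VERBS, i, POS_TO_PART_OF_SPEECH[tag])
--         for i, tag in enumerate(tags)
--         if tag in POS_TO_PART_OF_SPEECH
--     ]
--     return min(candidates)[2] if candidates else ""
-- ===== Notes on version B (the rewrite author's own statement) =====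
-- stated objective: alternative
-- what changed: Replaces A's two sequential scans (first for a non-verb label, then for any label) by a selection: build the list of (is-verb-label, index, label) candidates for the mapped tags and return the lexicographic minimum's label.
import Mathlib
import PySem

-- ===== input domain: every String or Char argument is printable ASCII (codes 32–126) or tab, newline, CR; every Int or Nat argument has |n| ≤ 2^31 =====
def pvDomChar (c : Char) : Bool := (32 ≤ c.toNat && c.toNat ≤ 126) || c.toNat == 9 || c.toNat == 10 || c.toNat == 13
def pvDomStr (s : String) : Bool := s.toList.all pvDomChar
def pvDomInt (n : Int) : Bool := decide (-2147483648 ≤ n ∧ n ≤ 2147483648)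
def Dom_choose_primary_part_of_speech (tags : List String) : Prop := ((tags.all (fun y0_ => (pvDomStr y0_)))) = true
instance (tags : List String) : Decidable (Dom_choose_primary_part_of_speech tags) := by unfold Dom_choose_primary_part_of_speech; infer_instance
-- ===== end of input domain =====

-- B replaces A's two sequential scans by ranking the mapped tags with (is-verb-label, index)
-- and taking the lexicographic minimum; alternative decomposition, same cost. Return value only.

-- The module-level dict POS_TO_PART_OF_SPEECH (distinct keys, literal dict)
def posItems : List (String × String) :=
  [("noun (common) (futsuumeishi)", "명사"),
   ("noun, used as a suffix", "접미 명사"),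
   ("noun, used as a prefix", "접두 명사"),
   ("noun or participle which takes the aux. verb suru", "する명사"),
   ("suru verb", "する동사"),
   ("suru verb - included", "する동사"),
   ("Godan verb with 'u' ending", "동사"),
   ("Godan verb with 'ku' ending", "동사"),
   ("Godan verb with 'gu' ending", "동사"),
   ("Godan verb with 'su' ending", "동사"),
   ("Godan verb with 'tsu' ending", "동사"),
   ("Godan verb with 'nu' ending", "동사"),
   ("Godan verb with 'bu' ending", "동사"),
   ("Godan verb with 'mu' ending", "동사"),
   ("Godan verb with 'ru' ending", "동사"),
   ("Ichidan verb", "동사"),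
   ("Kuru verb - special class", "동사"),
   ("intransitive verb", "자동사"),
   ("transitive verb", "타동사"),
   ("adjectival nouns or quasi-adjectives (keiyodoshi)", "형용동사"),
   ("adjective (keiyoushi)", "형용사"),
   ("adverb (fukushi)", "부사"),
   ("adverb taking the 'to' particle", "부사"),
   ("adverbial noun", "부사"),
   ("expressions (phrases, clauses, etc.)", "표현"),
   ("interjection (kandoushi)", "감탄사"),
   ("conjunction", "접속사"),
   ("pronoun", "대명사"),
   ("counter", "조수사"),
   ("auxiliary verb", "조동사"),
   ("prefix", "접두사"),
   ("suffix", "접미사")]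

def posDict : PySem.Dict String String := PySem.Dict.mk posItems

-- ===== PORT A =====
-- first loop of A: returns the first mapped label that is not in {"자동사","타동사"}
def posA1 : List String → Option String
  | [] => none
  | t :: ts =>
    match posDict.get? t with
    | some m => if m = "자동사" ∨ m = "타동사" then posA1 ts else some m
    | none => posA1 ts

-- second loop of A: returns the first truthy mapped label (`if mapped:`)
def posA2 : List String → Option String
  | [] => none
  | t :: ts =>
    match posDict.get? t with
    | some m => if m = "" then posA2 ts else some m
    | none => posA2 ts

def choose_primary_part_of_speech (tags : List String) : String :=
  match posA1 tags with
  | some m => m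
  | none =>
    match posA2 tags with
    | some m => m
    | none => ""

-- ===== PORT B =====
-- `label in _VERBS`
def pvIsVerb (m : String) : Bool := m == "자동사" || m == "타동사"

-- one candidate of Source B's comprehension: (mapped in _VERBS, i, mapped) when the tag is mapped
def candEntry (it : Int × String) : Option (Bool × Int × String) :=
  (posDict.get? it.2).map (fun m => (pvIsVerb m, it.1, m))

-- Python's lexicographic `<` on the (bool, int, str) candidate triples
def candLt (x y : Bool × Int × String) : Bool :=
  (!x.1 && y.1) ||
    (x.1 == y.1 && (decide (x.2.1 < y.2.1) || (x.2.1 == y.2.1 && decide (x.2.2 < y.2.2))))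

-- `min(candidates)`: leftmost minimal element under candLt (Python's min)
def pickMin : List (Bool × Int × String) → Option (Bool × Int × String)
  | [] => none
  | x :: rest => some (rest.foldl (fun best y => if candLt y best then y else best) x)

def choose_primary_part_of_speech_alt (tags : List String) : String :=
  match pickMin ((PySem.List.enumerate tags 0).filterMap candEntry) with
  | some c => c.2.2
  | none => ""

-- ===== PRECONDITION & SPEC =====
def Spec_choose_primary_part_of_speech (tags : List String) (out : String) : Prop := out = choose_primary_part_of_speech_alt tags
instance (tags : List String) (out : String) : Decidable (Spec_choose_primary_part_of_speech tags out) := by unfold Spec_choose_primary_part_of_speech; infer_instance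

-- ===== CLAIM (what is proved, stated in full; the proofs are below) =====
def Claim_equal_choose_primary_part_of_speech : Prop := ∀ (tags : List String), Dom_choose_primary_part_of_speech tags → Spec_choose_primary_part_of_speech tags (choose_primary_part_of_speech tags)

-- ===== LEMMAS AND PROOFS =====
-- every value of the literal dict is nonempty, so A's `if mapped:` test always fires
lemma posDict_val_ne (t m : String) (h : posDict.get? t = some m) : m ≠ "" := by
  have : ∀ (l : List (String × String)), (∀ p ∈ l, p.2 ≠ "") →
      (PySem.Dict.mk l).get? t = some m → m ≠ "" := by
    intro l
    induction l with
    | nil => intro _ h'; simp [PySem.Dict.get?] at h'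
    | cons p ps ih =>
      intro hall h'
      rw [PySem.Dict.get?_mk_cons] at h'
      by_cases hk : p.1 == t
      · simp [hk] at h'; subst h'; exact hall p (by simp)
      · simp [hk] at h'; exact ih (fun q hq => hall q (by simp [hq])) h'
  exact this posItems (by decide) h

lemma pvIsVerb_iff (m : String) : pvIsVerb m = true ↔ (m = "자동사" ∨ m = "타동사") := by
  simp [pvIsVerb]

-- every candidate's index is ≥ the enumeration start
lemma cands_index_lb (tags : List String) : ∀ (s : Int),
    ∀ y ∈ (PySem.List.enumerate tags s).filterMap candEntry, s ≤ y.2.1 := by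
  induction tags with
  | nil => intro s y hy; simp [PySem.List.enumerate_nil] at hy
  | cons t ts ih =>
    intro s y hy
    rw [PySem.List.enumerate_cons, List.filterMap_cons] at hy
    have step : y ∈ (PySem.List.enumerate ts (s+1)).filterMap candEntry → s ≤ y.2.1 := by
      intro h'; have := ih (s+1) y h'; omega
    cases hc : candEntry (s, t) with
    | none => rw [hc] at hy; exact step hy
    | some c =>
      rw [hc] at hy
      rcases List.mem_cons.mp hy with rfl | h'
      · simp [candEntry] at hc
        rcases hc with ⟨m, _, rfl⟩; simp
      · exact step h'

-- candidate indices are strictly increasing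
lemma cands_pairwise (tags : List String) : ∀ (s : Int),
    ((PySem.List.enumerate tags s).filterMap candEntry).Pairwise (fun a b => a.2.1 < b.2.1) := by
  induction tags with
  | nil => intro s; simp [PySem.List.enumerate_nil]
  | cons t ts ih =>
    intro s
    rw [PySem.List.enumerate_cons, List.filterMap_cons]
    cases hc : candEntry (s, t) with
    | none => exact ih (s+1)
    | some c =>
      refine List.pairwise_cons.mpr ⟨?_, ih (s+1)⟩
      intro y hy
      have hl := cands_index_lb ts (s+1) y hy
      simp [candEntry] at hc
      rcases hc with ⟨m, _, rfl⟩
      simp; omega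

-- the fold in pickMin selects the first non-verb candidate, else keeps the head
lemma fold_min (rest : List (Bool × Int × String)) : ∀ (best : Bool × Int × String),
    (∀ y ∈ rest, best.2.1 < y.2.1) → rest.Pairwise (fun a b => a.2.1 < b.2.1) →
    rest.foldl (fun best y => if candLt y best then y else best) best =
      if best.1 then (rest.find? (fun x => !x.1)).getD best else best := by
  induction rest with
  | nil => intro best _ _; simp
  | cons z rs ih =>
    intro best hb hp
    have hzi : best.2.1 < z.2.1 := hb z (by simp)
    have hne1 : ¬ (z.2.1 < best.2.1) := by omega
    have hne2 : ¬ (z.2.1 = best.2.1) := by omega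
    have hlt : candLt z best = (!z.1 && best.1) := by
      simp [candLt, hne1, hne2]
    rw [List.foldl_cons]
    have hp' := (List.pairwise_cons.mp hp).2
    have hz' := (List.pairwise_cons.mp hp).1
    cases hbv : best.1 with
    | false =>
      have hcf : candLt z best = false := by rw [hlt, hbv]; simp
      simp only [hcf, Bool.false_eq_true, if_false]
      rw [ih best (fun y hy => hb y (by simp [hy])) hp', hbv]; simp
    | true =>
      cases hzv : z.1 with
      | false =>
        have hct : candLt z best = true := by rw [hlt, hbv, hzv]; simp
        simp only [hct, if_true]
        rw [ih z hz' hp', hzv]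
        rw [List.find?_cons_of_pos (h := by simp [hzv])]
        simp
      | true =>
        have hcf : candLt z best = false := by rw [hlt, hzv]; simp
        simp only [hcf, Bool.false_eq_true, if_false]
        rw [ih best (fun y hy => hb y (by simp [hy])) hp', hbv]
        rw [List.find?_cons_of_neg (h := by simp [hzv])]
        simp

-- the first non-verb candidate's label is A's first loop
lemma cands_find (tags : List String) : ∀ (s : Int),
    (((PySem.List.enumerate tags s).filterMap candEntry).find? (fun x => !x.1)).map (·.2.2)
      = posA1 tags := by
  induction tags with
  | nil => intro s; simp [PySem.List.enumerate_nil, posA1]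
  | cons t ts ih =>
    intro s
    rw [PySem.List.enumerate_cons, List.filterMap_cons]
    cases hm : posDict.get? t with
    | none =>
      have hce : candEntry (s, t) = none := by simp [candEntry, hm]
      simp only [hce]
      have hA : posA1 (t :: ts) = posA1 ts := by simp [posA1, hm]
      rw [hA]; exact ih (s+1)
    | some m =>
      have hce : candEntry (s, t) = some (pvIsVerb m, s, m) := by simp [candEntry, hm]
      simp only [hce]
      by_cases hv : m = "자동사" ∨ m = "타동사"
      · have hpv : pvIsVerb m = true := (pvIsVerb_iff m).mpr hv
        have hA : posA1 (t :: ts) = posA1 ts := by simp [posA1, hm, hv]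
        rw [hA, List.find?_cons_of_neg (h := by simp [hpv])]
        exact ih (s+1)
      · have hpv : pvIsVerb m = false := by
          cases h' : pvIsVerb m
          · rfl
          · exact absurd ((pvIsVerb_iff m).mp h') hv
        have hA : posA1 (t :: ts) = some m := by simp [posA1, hm, hv]
        rw [hA, List.find?_cons_of_pos (h := by simp [hpv])]
        simp

-- the head candidate's label is A's second loop
lemma cands_head (tags : List String) : ∀ (s : Int),
    (((PySem.List.enumerate tags s).filterMap candEntry).head?).map (·.2.2) = posA2 tags := by
  induction tags with
  | nil => intro s; simp [PySem.List.enumerate_nil, posA2]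
  | cons t ts ih =>
    intro s
    rw [PySem.List.enumerate_cons, List.filterMap_cons]
    cases hm : posDict.get? t with
    | none =>
      have hce : candEntry (s, t) = none := by simp [candEntry, hm]
      simp only [hce]
      have hA : posA2 (t :: ts) = posA2 ts := by simp [posA2, hm]
      rw [hA]; exact ih (s+1)
    | some m =>
      have hce : candEntry (s, t) = some (pvIsVerb m, s, m) := by simp [candEntry, hm]
      simp only [hce]
      have hA : posA2 (t :: ts) = some m := by
        simp [posA2, hm, posDict_val_ne t m hm]
      rw [hA]; simp

-- ===== VERDICT (by name: the statement is the Claim_ definition above) =====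
theorem choose_primary_part_of_speech_spec : Claim_equal_choose_primary_part_of_speech := by
  intro tags _
  unfold Spec_choose_primary_part_of_speech choose_primary_part_of_speech choose_primary_part_of_speech_alt
  have hfind := cands_find tags 0
  have hhead := cands_head tags 0
  cases hc : (PySem.List.enumerate tags 0).filterMap candEntry with
  | nil =>
    rw [hc] at hfind hhead
    simp only [List.find?_nil, Option.map_none] at hfind
    simp only [List.head?_nil, Option.map_none] at hhead
    rw [← hfind, ← hhead]
    simp [pickMin]
  | cons x rest =>
    rw [hc] at hfind hhead
    have hp := cands_pairwise tags 0
    rw [hc] at hp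
    have hb := (List.pairwise_cons.mp hp).1
    have hp' := (List.pairwise_cons.mp hp).2
    simp only [pickMin]
    rw [fold_min rest x hb hp']
    cases hx : x.1 with
    | false =>
      rw [List.find?_cons_of_pos (h := by simp [hx])] at hfind
      simp only [Option.map_some] at hfind
      rw [← hfind]
      simp
    | true =>
      rw [List.find?_cons_of_neg (h := by simp [hx])] at hfind
      cases hf : rest.find? (fun x => !x.1) with
      | some z =>
        rw [hf] at hfind
        simp only [Option.map_some] at hfind
        rw [← hfind]; simp
      | none =>
        rw [hf] at hfind
        simp only [Option.map_none] at hfind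
        rw [← hfind]
        simp only [List.head?_cons, Option.map_some] at hhead
        rw [← hhead]
        simp
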